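-- pv_equiv track=rewrite | github.com/diegoasanch/Programacion-I-Trabajos-Practicos | TP3 Matrices/crear_matrices.py | matrizDiagSec
-- ===== SOURCE A (Python) =====
-- matrizCuad = lambda orden, filler=0: [[filler]*orden for i in range(orden)]
--
-- def matrizDiagSec(n=4):
--     'crea una matriz con potencias de 3 decrecientes en la diagonal secundaria'
--
--     matriz = matrizCuad(n)
--     num = 3 ** (n-1)
--     col = n-1
--     for i in range(n):
--         for j in range(n):
--             if j == col:
--                 matriz[i][j] = num
--                 num //= 3
--                 col -= 1
--     return matriz
-- ===== SOURCE B (Python) =====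
-- def matrizDiagSec(n=4):
--     'crea una matriz con potencias de 3 decrecientes en la diagonal secundaria'
--     filas = []
--     p = 1
--     for i in range(n - 1, -1, -1):      # bottom row first: smallest power
--         filas.append([0] * (n - 1 - i) + [p] + [0] * i)
--         p *= 3
--     filas.reverse()
--     return filas
-- ===== Notes on version B (the rewrite author's own statement) =====
-- stated objective: alternative
-- what changed: Eliminated the n x n per-cell scan and the conditional test entirely: B builds each row in one step by list concatenation [0]*(n-1-i) + [p] + [0]*i, constructs the matrix bottom-up with a multiplying accumulator p *= 3 (instead of A's top-down floor-dividing num //= 3 inside a column scan), and reverses the row list at the end.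
import Mathlib
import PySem

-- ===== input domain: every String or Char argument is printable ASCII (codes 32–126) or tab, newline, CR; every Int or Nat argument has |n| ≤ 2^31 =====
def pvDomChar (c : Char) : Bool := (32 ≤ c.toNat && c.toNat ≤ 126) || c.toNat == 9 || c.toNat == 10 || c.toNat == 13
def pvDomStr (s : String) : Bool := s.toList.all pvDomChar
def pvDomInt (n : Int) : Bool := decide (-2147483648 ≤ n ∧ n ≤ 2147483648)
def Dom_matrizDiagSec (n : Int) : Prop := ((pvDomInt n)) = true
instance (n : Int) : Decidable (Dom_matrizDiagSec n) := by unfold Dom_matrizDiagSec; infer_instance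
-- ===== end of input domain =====

-- B drops A's n×n per-cell scan: it builds each row in one step by concatenation
-- [0]*(n-1-i) + [p] + [0]*i, bottom-up with a multiplying accumulator, then reverses.

-- ===== PORT A =====
-- matrizCuad = lambda orden, filler=0: [[filler]*orden for i in range(orden)]
-- ([filler]*orden is List.replicate orden.toNat filler: Python yields [] for orden ≤ 0, exact)
def matrizCuadA (orden : Int) (filler : Int) : List (List Int) :=
  (PySem.List.pyRange 0 orden 1).map (fun _ => List.replicate orden.toNat filler)

-- num = 3 ** (n-1) is ported as 3 ^ (n-1).toNat: exact for n ≥ 1; for n ≤ 0 Python's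
-- value is a float, but the loop is then empty so num is never read and the result is [].
def matrizDiagSec (n : Int) : List (List Int) :=
  ((PySem.List.pyRange 0 n 1).foldl (fun st i =>
      (PySem.List.pyRange 0 n 1).foldl (fun (st : List (List Int) × Int × Int) j =>
        if j = st.2.2 then
          (PySem.List.pySetD st.1 i (PySem.List.pySetD (PySem.List.pyGetD st.1 i []) j st.2.1),
           PySem.Int.floordiv st.2.1 3, st.2.2 - 1)
        else st) st)
    (matrizCuadA n 0, 3 ^ (n - 1).toNat, n - 1)).1

-- ===== PORT B =====
-- for i in range(n-1, -1, -1): filas.append([0]*(n-1-i) + [p] + [0]*i); p *= 3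
-- ([0]*k is List.replicate k.toNat 0: Python yields [] for k ≤ 0, exact)
def matrizDiagSec_alt (n : Int) : List (List Int) :=
  (((PySem.List.pyRange (n - 1) (-1) (-1)).foldl
      (fun (st : List (List Int) × Int) i =>
        (st.1 ++ [List.replicate (n - 1 - i).toNat 0 ++ [st.2] ++ List.replicate i.toNat 0],
         st.2 * 3))
      ([], 1)).1).reverse

-- ===== PRECONDITION & SPEC =====
def Spec_matrizDiagSec (n : Int) (out : List (List Int)) : Prop := out = matrizDiagSec_alt n
instance (n : Int) (out : List (List Int)) : Decidable (Spec_matrizDiagSec n out) := by unfold Spec_matrizDiagSec; infer_instance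

-- ===== CLAIM (what is proved, stated in full; the proofs are below) =====
def Claim_equal_matrizDiagSec : Prop := ∀ (n : Int), Dom_matrizDiagSec n → Spec_matrizDiagSec n (matrizDiagSec n)

-- ===== LEMMAS AND PROOFS =====

-- a fold whose every step fixes the state is the identity
theorem pvFoldlId {α β : Type} (F : β → α → β) :
    ∀ (l : List α) (st : β), (∀ j ∈ l, F st j = st) → l.foldl F st = st := by
  intro l
  induction l with
  | nil => intro st _; rfl
  | cons x xs ih =>
      intro st h
      have hx : F st x = st := h x (List.mem_cons_self)
      simp only [List.foldl_cons, hx]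
      exact ih st (fun j hj => h j (List.mem_cons_of_mem _ hj))

-- A's inner loop over j hits exactly the column c = st.2.2 (when 0 ≤ c < n)
theorem pvInner (n i : Int) (mat : List (List Int)) (u c : Int)
    (hc0 : 0 ≤ c) (hcn : c < n) :
    (PySem.List.pyRange 0 n 1).foldl (fun (st : List (List Int) × Int × Int) j =>
        if j = st.2.2 then
          (PySem.List.pySetD st.1 i (PySem.List.pySetD (PySem.List.pyGetD st.1 i []) j st.2.1),
           PySem.Int.floordiv st.2.1 3, st.2.2 - 1)
        else st) (mat, u, c)
    = (PySem.List.pySetD mat i (PySem.List.pySetD (PySem.List.pyGetD mat i []) c u),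
       PySem.Int.floordiv u 3, c - 1) := by
  rw [PySem.List.pyRange_one_append 0 c n hc0 (le_of_lt hcn),
      PySem.List.pyRange_one_cons hcn, List.foldl_append]
  rw [pvFoldlId _ (PySem.List.pyRange 0 c 1) (mat, u, c) (by
        intro j hj
        have hjc := (PySem.List.mem_pyRange_one).1 hj
        show (if j = c then _ else _) = _
        rw [if_neg (by omega)])]
  rw [List.foldl_cons, if_pos rfl]
  exact pvFoldlId _ _ _ (by
    intro j hj
    have hjc := (PySem.List.mem_pyRange_one).1 hj
    show (if j = c - 1 then _ else _) = _
    rw [if_neg (by omega)])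

-- num after k floor-divisions by 3, for k ≤ m and 1 ≤ m
def pvNumAt (m k : Nat) : Int := if k < m then 3 ^ (m - 1 - k) else 0

theorem pvNumAt_step (m k : Nat) (hk : k < m) :
    PySem.Int.floordiv (pvNumAt m k) 3 = pvNumAt m (k + 1) := by
  unfold pvNumAt
  rw [if_pos hk]
  by_cases h : k + 1 < m
  · rw [if_pos h]
    have he : m - 1 - k = (m - 1 - (k + 1)) + 1 := by omega
    rw [he, pow_succ, PySem.Int.floordiv_eq_ediv_of_pos (by norm_num)]
    exact Int.mul_ediv_cancel _ (by norm_num)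
  · have hm : m - 1 - k = 0 := by omega
    rw [if_neg h, hm]
    decide

-- the diagonal row as A builds it: the zero row with 3^(m-1-k) placed at m-1-k
def pvRow (m k : Nat) : List Int := (List.replicate m (0 : Int)).set (m - 1 - k) (3 ^ (m - 1 - k))

-- the matrix after A has processed the first k rows
def pvMatAt (m k : Nat) : List (List Int) :=
  (List.range m).map (fun i => if i < k then pvRow m i else List.replicate m (0 : Int))

-- outer-loop invariant: folding A's body over the first k row indices
theorem pvOuter (m : Nat) (hm : 1 ≤ m) :
    ∀ k, k ≤ m →
    (PySem.List.pyRange 0 (k : Int) 1).foldl (fun st i =>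
      (PySem.List.pyRange 0 (m : Int) 1).foldl (fun (st : List (List Int) × Int × Int) j =>
        if j = st.2.2 then
          (PySem.List.pySetD st.1 i (PySem.List.pySetD (PySem.List.pyGetD st.1 i []) j st.2.1),
           PySem.Int.floordiv st.2.1 3, st.2.2 - 1)
        else st) st)
      (matrizCuadA (m : Int) 0, 3 ^ (((m : Int) - 1).toNat), (m : Int) - 1)
    = (pvMatAt m k, pvNumAt m k, (m : Int) - 1 - (k : Int)) := by
  intro k
  induction k with
  | zero =>
      intro _
      rw [show ((0 : Nat) : Int) = 0 from rfl, PySem.List.pyRange_one_eq_nil le_rfl]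
      simp only [List.foldl_nil]
      refine Prod.ext ?_ (Prod.ext ?_ ?_)
      · simp only [matrizCuadA, pvMatAt, PySem.List.pyRange_zero, List.map_map]
        exact List.map_congr_left (fun i _ => by simp)
      · simp only [pvNumAt, if_pos (by omega : 0 < m)]
        congr 1
        omega
      · simp
  | succ k ih =>
      intro hk1
      have hk : k < m := by omega
      rw [show ((k + 1 : Nat) : Int) = (k : Int) + 1 by push_cast; ring,
          PySem.List.pyRange_one_succ_right (by positivity), List.foldl_append,
          ih (by omega)]
      simp only [List.foldl_cons, List.foldl_nil]
      rw [pvInner (m : Int) (k : Int) _ _ _ (by omega) (by omega)]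
      refine Prod.ext ?_ (Prod.ext (pvNumAt_step m k hk) (by push_cast; ring))
      have hget : PySem.List.pyGetD (pvMatAt m k) (k : Int) [] = List.replicate m (0 : Int) := by
        rw [PySem.List.pyGetD_natCast]
        simp [pvMatAt, List.getD_eq_getElem?_getD, hk]
      rw [hget,
          show ((m : Int) - 1 - (k : Int)) = ((m - 1 - k : Nat) : Int) by omega,
          PySem.List.pySetD_natCast, PySem.List.pySetD_natCast]
      have hrow : (List.replicate m (0 : Int)).set (m - 1 - k) (pvNumAt m k) = pvRow m k := by
        simp [pvRow, pvNumAt, if_pos hk]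
      rw [hrow]
      apply List.ext_getElem
      · simp [pvMatAt]
      · intro t h1 h2
        have ht : t < m := by simpa [pvMatAt] using h2
        simp only [pvMatAt, List.getElem_set, List.getElem_map, List.getElem_range]
        by_cases hc : k = t
        · rw [if_pos hc, if_pos (by omega), ← hc]
        · rw [if_neg hc]
          by_cases hlt : t < k
          · rw [if_pos hlt, if_pos (by omega)]
          · rw [if_neg hlt, if_neg (by omega)]

-- B's row for index i with diagonal value v, as concatenation
def pvRowB (m i : Nat) (v : Int) : List Int :=
  List.replicate (m - 1 - i) 0 ++ [v] ++ List.replicate i 0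

-- concatenated row = set-in-zero-row, for i < m and the right value
theorem pvRowB_eq_pvRow (m i : Nat) (hi : i < m) :
    pvRowB m i (3 ^ (m - 1 - i)) = pvRow m i := by
  apply List.ext_getElem
  · simp [pvRowB, pvRow]; omega
  · intro t h1 h2
    have ht : t < m := by simpa [pvRow] using h2
    simp only [pvRow, List.getElem_set, List.getElem_replicate]
    by_cases hc : t < m - 1 - i
    · rw [if_neg (by omega)]
      simp [pvRowB, hc]
    · by_cases he : t = m - 1 - i
      · rw [if_pos (by omega)]
        subst he
        simp [pvRowB]
      · rw [if_neg (by omega)]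
        simp only [pvRowB, List.getElem_append]
        simp
        omega
    
-- B's countdown fold appends rows i = t-1, t-2, …, 0 with value p·3^(t-1-i), and cubes… triples p each step
theorem pvFoldB (m : Nat) :
    ∀ (t : Nat) (acc : List (List Int)) (p : Int),
    ((PySem.List.pyRange ((t : Int) - 1) (-1) (-1)).foldl
      (fun (st : List (List Int) × Int) i =>
        (st.1 ++ [List.replicate ((m : Int) - 1 - i).toNat 0 ++ [st.2] ++ List.replicate i.toNat 0],
         st.2 * 3))
      (acc, p)).1
    = acc ++ (List.range t).reverse.map (fun i => pvRowB m i (p * 3 ^ (t - 1 - i))) := by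
  intro t
  induction t with
  | zero =>
      intro acc p
      rw [PySem.List.pyRange_neg_one_eq_nil (by norm_num)]
      simp
  | succ t ih =>
      intro acc p
      rw [show ((t + 1 : Nat) : Int) - 1 = (t : Int) by push_cast; ring,
          PySem.List.pyRange_neg_one_cons (by omega : (-1 : Int) < (t : Int)),
          List.foldl_cons]
      rw [ih (acc ++ [List.replicate ((m : Int) - 1 - (t : Int)).toNat 0 ++ [p] ++
            List.replicate ((t : Int)).toNat 0]) (p * 3)]
      rw [List.range_succ, List.reverse_append, List.reverse_singleton, List.map_append,
          ← List.append_assoc]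
      congr 1
      · congr 1
        have hhead : List.replicate ((m : Int) - 1 - (t : Int)).toNat 0 ++ [p] ++
            List.replicate ((t : Int)).toNat 0 = pvRowB m t (p * 3 ^ (t + 1 - 1 - t)) := by
          simp only [pvRowB]
          rw [show ((m : Int) - 1 - (t : Int)).toNat = m - 1 - t by omega,
              Int.toNat_natCast, show t + 1 - 1 - t = 0 by omega]
          simp
        rw [hhead]
        rfl
      refine List.map_congr_left (fun i hi => ?_)
      have him : i < t := by
        have := List.mem_reverse.1 hi
        exact List.mem_range.1 this
      have harith : p * 3 * 3 ^ (t - 1 - i) = p * 3 ^ (t + 1 - 1 - i) := by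
        rw [show t + 1 - 1 - i = (t - 1 - i) + 1 by omega, pow_succ]
        ring
      rw [harith]

-- ===== VERDICT (by name: the statement is the Claim_ definition above) =====
theorem matrizDiagSec_spec : Claim_equal_matrizDiagSec := by
  intro n _
  unfold Spec_matrizDiagSec
  by_cases hn : n ≤ 0
  · have hA : matrizDiagSec n = [] := by
      unfold matrizDiagSec
      rw [PySem.List.pyRange_one_eq_nil hn]
      simp [matrizCuadA, PySem.List.pyRange_one_eq_nil hn]
    have hB : matrizDiagSec_alt n = [] := by
      unfold matrizDiagSec_alt
      rw [PySem.List.pyRange_neg_one_eq_nil (by omega)]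
      rfl
    rw [hA, hB]
  · obtain ⟨m, hm⟩ : ∃ m : Nat, n = (m : Int) := ⟨n.toNat, by omega⟩
    subst hm
    have hm1 : 1 ≤ m := by omega
    have hA : matrizDiagSec (m : Int) = pvMatAt m m := by
      unfold matrizDiagSec
      rw [pvOuter m hm1 m le_rfl]
    have hB : matrizDiagSec_alt (m : Int)
        = (List.range m).map (fun i => pvRowB m i (3 ^ (m - 1 - i))) := by
      unfold matrizDiagSec_alt
      rw [pvFoldB m m [] 1]
      rw [List.nil_append, List.map_reverse, List.reverse_reverse]
      exact List.map_congr_left (fun i _ => by rw [one_mul])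
    rw [hA, hB]
    unfold pvMatAt
    refine List.map_congr_left (fun i hi => ?_)
    have him : i < m := List.mem_range.1 hi
    rw [if_pos him, ← pvRowB_eq_pvRow m i him]
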